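-- pv_equiv track=rewrite | github.com/Musadalancikar/Codeforces-Python | 1538A-StoneGame.py | stone_game4
-- ===== SOURCE A (Python) =====
-- def stone_game4(n, lst):
--     lst_copy = lst.copy()
--     min_lst = min(lst_copy)
--     max_lst = max(lst_copy)
--     total = 0
--     for j in range(n):
--         if min_lst in lst_copy:
--             lst_copy.remove(lst_copy[-1])
--             total += 1
--         else:
--             break
--     if max_lst in lst_copy:
--         for k in range(len(lst_copy)):
--             if max_lst in lst_copy:
--                 lst_copy.remove(lst_copy[0])
--                 total += 1
--             else:
--                 break
--     return total
-- ===== SOURCE B (Python) =====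
-- def stone_game4(n, lst):
--     mn = min(lst)
--     mx = max(lst)
--     budget = n if n > 0 else 0
--     total = 0
--     cur = lst
--     # phase 1: A removes one element per step; removals proceed value-group by
--     # value-group from the back, so consume a whole group (all occurrences of the
--     # current last value) per iteration.
--     while cur and budget > 0:
--         v = cur[-1]
--         c = cur.count(v)
--         if c <= budget:
--             total += c
--             budget -= c
--             cur = [x for x in cur if x != v]
--             if v == mn:
--                 break
--         else:
--             # budget runs out mid-group: the first `budget` occurrences of v go
--             removed = 0
--             nxt = []
--             for x in cur:
--                 if x == v and removed < budget:
--                     removed += 1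
--                 else:
--                     nxt.append(x)
--             total += budget
--             budget = 0
--             cur = nxt
--     # phase 2: A pops heads while mx is present = everything up to mx's last index
--     if mx in cur:
--         last_i = 0
--         for i, x in enumerate(cur):
--             if x == mx:
--                 last_i = i
--         total += last_i + 1
--     return total
-- ===== Notes on version B (the rewrite author's own statement) =====
-- stated objective: alternative
-- what changed: B replaces A's element-by-element simulation (a membership scan plus list.remove per removed element) by group-wise processing: it consumes all occurrences of the current last value at once with count/filter, and computes the head-popping phase in closed form as last-index-of-max + 1.
import Mathlib
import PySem

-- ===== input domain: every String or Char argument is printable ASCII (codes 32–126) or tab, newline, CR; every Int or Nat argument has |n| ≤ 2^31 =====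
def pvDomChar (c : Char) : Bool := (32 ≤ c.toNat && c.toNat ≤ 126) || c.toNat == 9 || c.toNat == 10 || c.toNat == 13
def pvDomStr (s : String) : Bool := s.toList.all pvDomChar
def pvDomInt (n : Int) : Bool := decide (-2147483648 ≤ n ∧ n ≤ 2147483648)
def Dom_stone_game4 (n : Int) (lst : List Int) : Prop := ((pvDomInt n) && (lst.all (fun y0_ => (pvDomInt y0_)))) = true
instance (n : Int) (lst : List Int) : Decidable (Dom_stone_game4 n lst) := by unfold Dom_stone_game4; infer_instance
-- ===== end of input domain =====

-- B processes A's removals value-group by value-group (count/filter per group) and computes the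
-- head-popping phase in closed form; equivalence is proved on nonempty lists (A raises on []).

-- ===== PORT A =====
-- for j in range(n): if min in lst: lst.remove(lst[-1]); total += 1; else: break
def pvA_phase1 (mn : Int) : Nat → List Int → Int → List Int × Int
  | 0, l, t => (l, t)
  | fuel+1, l, t =>
    if mn ∈ l then
      match PySem.List.pyGet? l (-1) with
      | some v =>
        match PySem.List.remove? l v with
        | some l' => pvA_phase1 mn fuel l' (t + 1)
        | none => (l, t)      -- unreachable: lst[-1] is in lst
      | none => (l, t)        -- unreachable: min ∈ lst means lst nonempty
    else (l, t)

-- for k in range(len(lst)): if max in lst: lst.remove(lst[0]); total += 1; else: break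
def pvA_phase2 (mx : Int) : Nat → List Int → Int → Int
  | 0, _, t => t
  | fuel+1, l, t =>
    if mx ∈ l then
      match PySem.List.pyGet? l 0 with
      | some h =>
        match PySem.List.remove? l h with
        | some l' => pvA_phase2 mx fuel l' (t + 1)
        | none => t           -- unreachable
      | none => t             -- unreachable
    else t

def stone_game4 (n : Int) (lst : List Int) : Int :=
  match PySem.List.min? lst (fun x => x), PySem.List.max? lst (fun x => x) with
  | some mn, some mx =>
    match pvA_phase1 mn n.toNat lst 0 with
    | (l1, t1) => if mx ∈ l1 then pvA_phase2 mx l1.length l1 t1 else t1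
  | _, _ => 0                 -- unreachable inside Pre_ (min/max of [] raise)

-- ===== PORT B =====
-- the first `b` occurrences of v are dropped, the rest kept
def pvB_removeFirstN (v : Int) : Nat → List Int → List Int
  | _, [] => []
  | 0, l => l
  | b+1, x :: xs => if x = v then pvB_removeFirstN v b xs else x :: pvB_removeFirstN v (b+1) xs

-- while cur and budget > 0: consume the whole group of the current last value
def pvB_phase1 (mn : Int) (cur : List Int) (budget total : Int) : List Int × Int :=
  if h : cur ≠ [] ∧ 0 < budget then
    let v := cur.getLast h.1
    let c : Int := (cur.count v : Int)
    if c ≤ budget then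
      if v = mn then (cur.filter (· != v), total + c)
      else pvB_phase1 mn (cur.filter (· != v)) (budget - c) (total + c)
    else (pvB_removeFirstN v budget.toNat cur, total + budget)
  else (cur, total)
termination_by cur.length
decreasing_by
  have hv : cur.getLast h.1 ∈ cur := List.getLast_mem h.1
  have h2 : cur.getLast h.1 ∈ cur.filter (fun x => !(x != cur.getLast h.1)) := by
    simp [List.mem_filter, hv]
  have h3 := List.length_eq_length_filter_add (l := cur) (fun x => x != cur.getLast h.1)
  have h4 : 0 < (cur.filter (fun x => !(x != cur.getLast h.1))).length :=
    List.length_pos_of_mem h2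
  simp only [List.unattach_filter, List.unattach_attach]
  omega

def stone_game4_alt (n : Int) (lst : List Int) : Int :=
  match PySem.List.min? lst (fun x => x) with
  | none => 0
  | some mn =>
    match PySem.List.max? lst (fun x => x) with
    | none => 0
    | some mx =>
      let budget : Int := if 0 < n then n else 0
      let r := pvB_phase1 mn lst budget 0
      if mx ∈ r.1 then
        r.2 + (PySem.List.enumerate r.1).foldl
          (fun acc p => if p.2 = mx then p.1 else acc) 0 + 1
      else r.2

-- ===== PRECONDITION & SPEC =====
-- Pre_ excludes only the empty list, on which A raises ValueError (min of an empty sequence).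
def Pre_stone_game4 (n : Int) (lst : List Int) : Prop := lst ≠ []
instance (n : Int) (lst : List Int) : Decidable (Pre_stone_game4 n lst) := by
  unfold Pre_stone_game4; infer_instance
def pvWitness_stone_game4 : Int × List Int := (3, [1, 2, 2])

def Spec_stone_game4 (n : Int) (lst : List Int) (out : Int) : Prop := out = stone_game4_alt n lst
instance (n : Int) (lst : List Int) (out : Int) : Decidable (Spec_stone_game4 n lst out) := by
  unfold Spec_stone_game4; infer_instance

-- ===== CLAIM (what is proved, stated in full; the proofs are below) =====
def Claim_equal_stone_game4 : Prop := ∀ (n : Int) (lst : List Int), Dom_stone_game4 n lst → Pre_stone_game4 n lst → Spec_stone_game4 n lst (stone_game4 n lst)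

-- ===== LEMMAS AND PROOFS =====

-- last index of mx in l (meaningful when mx ∈ l)
def pvLast (mx : Int) : List Int → Int
  | [] => 0
  | h :: r => if mx ∈ r then pvLast mx r + 1 else 0

theorem pvA1_stuck (mn : Int) (fuel : Nat) (l : List Int) (t : Int) (h : mn ∉ l) :
    pvA_phase1 mn fuel l t = (l, t) := by
  cases fuel <;> simp [pvA_phase1, h]

theorem pv_erase_filter (v : Int) (l : List Int) :
    (l.erase v).filter (· != v) = l.filter (· != v) := by
  induction l with
  | nil => rfl
  | cons h tl ih =>
    by_cases hv : h = v
    · subst hv; simp [List.erase_cons_head]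
    · rw [List.erase_cons_tail (by simpa using hv)]
      simp only [List.filter_cons]
      rw [ih]

theorem pv_erase_eq_filter_of_count_one (v : Int) (l : List Int) (h : l.count v = 1) :
    l.erase v = l.filter (· != v) := by
  induction l with
  | nil => rfl
  | cons x tl ih =>
    by_cases hv : x = v
    · subst hv
      have h0 : tl.count x = 0 := by
        have : (x :: tl).count x = tl.count x + 1 := List.count_cons_self; omega
      have hnm : x ∉ tl := by
        intro hx
        exact absurd h0 (by simpa [List.count_eq_zero] using hx)
      rw [List.erase_cons_head]
      have hf : tl.filter (· != x) = tl := List.filter_eq_self.mpr (by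
        intro a ha
        simp only [bne_iff_ne, ne_eq]
        intro he; exact hnm (he ▸ ha))
      simp [hf]
    · have h1 : tl.count v = 1 := by
        simpa [List.count_cons, hv] using h
      rw [List.erase_cons_tail (by simpa using hv)]
      simp [hv, ih h1]

theorem pv_getLast?_erase (v : Int) (l : List Int) (hv : l.getLast? = some v)
    (hc : 2 ≤ l.count v) : (l.erase v).getLast? = some v := by
  obtain ⟨l1, rfl⟩ := List.getLast?_eq_some_iff.mp hv
  have hv1 : v ∈ l1 := by
    have : (l1 ++ [v]).count v = l1.count v + 1 := by simp
    have : 1 ≤ l1.count v := by omega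
    exact List.count_pos_iff.mp this
  rw [List.erase_append_left _ hv1, List.getLast?_concat]

theorem pvA1_step (mn : Int) (fuel : Nat) (l : List Int) (t : Int) (v : Int)
    (hmem : mn ∈ l) (hv : l.getLast? = some v) :
    pvA_phase1 mn (fuel + 1) l t = pvA_phase1 mn fuel (l.erase v) (t + 1) := by
  have hvm : v ∈ l := List.mem_of_getLast? hv
  have hr : PySem.List.remove? l v = some (l.erase v) :=
    PySem.List.remove?_eq_some_erase (v := v) (xs := l) hvm
  simp only [pvA_phase1, if_pos hmem, PySem.List.pyGet?_neg_one, hv, hr]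

-- group collapse, v = mn
theorem pvA1_group_min (mn : Int) (c : Nat) : ∀ (fuel : Nat) (l : List Int) (t : Int),
    l.getLast? = some mn → l.count mn = c → mn ∈ l → c ≤ fuel →
    pvA_phase1 mn fuel l t = (l.filter (· != mn), t + c) := by
  induction c with
  | zero =>
    intro fuel l t hv hc hm _
    have := List.count_pos_iff.mpr hm
    omega
  | succ c ih =>
    intro fuel l t hv hc hm hle
    cases fuel with
    | zero => omega
    | succ k =>
      rw [pvA1_step mn k l t mn hm hv]
      by_cases hc2 : c = 0
      · subst hc2
        rw [pv_erase_eq_filter_of_count_one mn l hc]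
        rw [pvA1_stuck mn k _ _ (by simp)]
        simp
      · have hc2' : 2 ≤ l.count mn := by omega
        have hlast := pv_getLast?_erase mn l hv hc2'
        have hcount : (l.erase mn).count mn = c := by
          rw [List.count_erase_self]; omega
        have hmem' : mn ∈ l.erase mn := List.count_pos_iff.mp (by omega)
        rw [ih k (l.erase mn) (t + 1) hlast hcount hmem' (by omega)]
        rw [pv_erase_filter]
        have : t + 1 + (c : Int) = t + ((c : Nat) + 1 : Nat) := by push_cast; ring
        rw [this]

-- group collapse, v ≠ mn
theorem pvA1_group_ne (mn v : Int) (hne : v ≠ mn) (c : Nat) :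
    ∀ (fuel : Nat) (l : List Int) (t : Int),
    l.getLast? = some v → l.count v = c → mn ∈ l → c ≤ fuel →
    pvA_phase1 mn fuel l t = pvA_phase1 mn (fuel - c) (l.filter (· != v)) (t + c) := by
  induction c with
  | zero =>
    intro fuel l t hv hc hm _
    have := List.count_pos_iff.mpr (List.mem_of_getLast? hv)
    omega
  | succ c ih =>
    intro fuel l t hv hc hm hle
    cases fuel with
    | zero => omega
    | succ k =>
      rw [pvA1_step mn k l t v hm hv]
      by_cases hc2 : c = 0
      · subst hc2
        rw [pv_erase_eq_filter_of_count_one v l hc]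
        have h1 : k + 1 - 1 = k := rfl
        have h2 : t + ((0 : Nat) + 1 : Nat) = t + 1 := by push_cast; ring
        rw [h1, h2]
      · have hc2' : 2 ≤ l.count v := by omega
        have hlast := pv_getLast?_erase v l hv hc2'
        have hcount : (l.erase v).count v = c := by
          rw [List.count_erase_self]; omega
        have hmem' : mn ∈ l.erase v := (List.mem_erase_of_ne (Ne.symm hne)).mpr hm
        rw [ih k (l.erase v) (t + 1) hlast hcount hmem' (by omega)]
        rw [pv_erase_filter]
        have h1 : k - c = k + 1 - (c + 1) := by omega
        have h2 : t + 1 + (c : Int) = t + ((c : Nat) + 1 : Nat) := by push_cast; ring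
        rw [h1, h2]

theorem pv_removeFirstN_succ (v : Int) (b : Nat) (l : List Int) (hv : v ∈ l) :
    pvB_removeFirstN v (b + 1) l = pvB_removeFirstN v b (l.erase v) := by
  induction l generalizing b with
  | nil => cases hv
  | cons x tl ih =>
    by_cases hx : x = v
    · subst hx
      rw [List.erase_cons_head]
      simp [pvB_removeFirstN]
    · have hvtl : v ∈ tl := by
        cases List.mem_cons.mp hv with
        | inl h => exact absurd h.symm hx
        | inr h => exact h
      rw [List.erase_cons_tail (by simpa using hx)]
      cases b with
      | zero =>
        show (if x = v then pvB_removeFirstN v 0 tl else x :: pvB_removeFirstN v 1 tl)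
          = x :: tl.erase v
        rw [if_neg hx, ih 0 hvtl]
        cases h : tl.erase v <;> rfl
      | succ b' =>
        show (if x = v then pvB_removeFirstN v (b' + 1) tl
              else x :: pvB_removeFirstN v (b' + 2) tl)
          = if x = v then pvB_removeFirstN v b' (tl.erase v)
              else x :: pvB_removeFirstN v (b' + 1) (tl.erase v)
        rw [if_neg hx, if_neg hx, ih (b' + 1) hvtl]

-- group partially consumed: fuel runs out inside the group
theorem pvA1_partial (mn v : Int) : ∀ (fuel : Nat) (l : List Int) (t : Int),
    l.getLast? = some v → mn ∈ l → fuel < l.count v →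
    pvA_phase1 mn fuel l t = (pvB_removeFirstN v fuel l, t + fuel) := by
  intro fuel
  induction fuel with
  | zero =>
    intro l t hv hm _
    cases l with
    | nil => cases hm
    | cons x tl => simp [pvA_phase1, pvB_removeFirstN]
  | succ k ih =>
    intro l t hv hm hlt
    have hvm : v ∈ l := List.mem_of_getLast? hv
    rw [pvA1_step mn k l t v hm hv]
    have hc2 : 2 ≤ l.count v := by omega
    have hlast := pv_getLast?_erase v l hv hc2
    have hcount : (l.erase v).count v = l.count v - 1 := List.count_erase_self
    have hmem' : mn ∈ l.erase v := by
      by_cases hvm2 : v = mn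
      · subst hvm2; exact List.count_pos_iff.mp (by omega)
      · exact (List.mem_erase_of_ne (Ne.symm hvm2)).mpr hm
    rw [ih (l.erase v) (t + 1) hlast hmem' (by omega)]
    rw [← pv_removeFirstN_succ v k l hvm]
    have : t + 1 + (k : Int) = t + ((k : Nat) + 1 : Nat) := by push_cast; ring
    rw [this]

theorem pv_phase1_eq (mn : Int) : ∀ (fuel : Nat) (l : List Int) (t : Int), mn ∈ l →
    pvA_phase1 mn fuel l t = pvB_phase1 mn l (fuel : Int) t := by
  intro fuel
  induction fuel using Nat.strong_induction_on with
  | _ fuel ih =>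
    intro l t hm
    cases fuel with
    | zero =>
      rw [pvB_phase1, dif_neg (by simp)]
      rfl
    | succ k =>
      have hne : l ≠ [] := List.ne_nil_of_mem hm
      have hpos : (0 : Int) < ((k + 1 : Nat) : Int) := by positivity
      rw [pvB_phase1, dif_pos ⟨hne, hpos⟩]
      have hv? : l.getLast? = some (l.getLast hne) := List.getLast?_eq_some_getLast hne
      have hcpos : 0 < l.count (l.getLast hne) :=
        List.count_pos_iff.mpr (List.getLast_mem hne)
      by_cases hcle : ((l.count (l.getLast hne) : Nat) : Int) ≤ ((k + 1 : Nat) : Int)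
      · rw [if_pos hcle]
        have hclen : l.count (l.getLast hne) ≤ k + 1 := by exact_mod_cast hcle
        by_cases hvmn : l.getLast hne = mn
        · rw [if_pos hvmn]
          rw [pvA1_group_min mn (l.count mn) (k + 1) l t (hvmn ▸ hv?) rfl hm
            (hvmn ▸ hclen)]
          rw [hvmn]
        · rw [if_neg hvmn]
          rw [pvA1_group_ne mn (l.getLast hne) hvmn (l.count (l.getLast hne))
            (k + 1) l t hv? rfl hm hclen]
          have hmf : mn ∈ l.filter (· != l.getLast hne) := by
            simp only [List.mem_filter, bne_iff_ne, ne_eq]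
            exact ⟨hm, fun h => hvmn h.symm⟩
          rw [ih (k + 1 - l.count (l.getLast hne)) (by omega) _ _ hmf]
          have hcast : (((k + 1 - l.count (l.getLast hne) : Nat)) : Int)
              = ((k + 1 : Nat) : Int) - ((l.count (l.getLast hne) : Nat) : Int) := by
            omega
          rw [hcast]
      · rw [if_neg hcle]
        have hclt : k + 1 < l.count (l.getLast hne) := by
          have : ¬ l.count (l.getLast hne) ≤ k + 1 := fun h => hcle (by exact_mod_cast h)
          omega
        rw [pvA1_partial mn (l.getLast hne) (k + 1) l t hv? hm hclt]
        have : (((k + 1 : Nat) : Int)).toNat = k + 1 := by omega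
        rw [this]

theorem pvA2_stuck (mx : Int) (fuel : Nat) (l : List Int) (t : Int) (h : mx ∉ l) :
    pvA_phase2 mx fuel l t = t := by
  cases fuel <;> simp [pvA_phase2, h]

theorem pvA2_eq (mx : Int) : ∀ (l : List Int) (fuel : Nat) (t : Int), mx ∈ l →
    l.length ≤ fuel → pvA_phase2 mx fuel l t = t + pvLast mx l + 1 := by
  intro l
  induction l with
  | nil => intro fuel t hm; cases hm
  | cons h r ih =>
    intro fuel t hm hlen
    cases fuel with
    | zero => simp at hlen
    | succ k =>
      have hrem : PySem.List.remove? (h :: r) h = some r := PySem.List.remove?_cons_self h r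
      simp only [pvA_phase2, if_pos hm, PySem.List.pyGet?_zero_cons, hrem]
      by_cases hmr : mx ∈ r
      · rw [ih k (t + 1) hmr (by simpa using hlen)]
        simp only [pvLast, if_pos hmr]
        ring
      · rw [pvA2_stuck mx k r (t + 1) hmr]
        simp only [pvLast, if_neg hmr]
        ring

theorem pvB2_none (mx : Int) : ∀ (l : List Int) (s acc : Int), mx ∉ l →
    (PySem.List.enumerate l s).foldl (fun acc p => if p.2 = mx then p.1 else acc) acc = acc := by
  intro l
  induction l with
  | nil => intro s acc _; rfl
  | cons h r ih =>
    intro s acc hm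
    rw [PySem.List.enumerate_cons]
    simp only [List.foldl_cons]
    rw [if_neg (by intro he; exact hm (he ▸ List.mem_cons_self))]
    exact ih (s + 1) acc (fun hx => hm (List.mem_cons_of_mem h hx))

theorem pvB2_eq (mx : Int) : ∀ (l : List Int) (s acc : Int), mx ∈ l →
    (PySem.List.enumerate l s).foldl (fun acc p => if p.2 = mx then p.1 else acc) acc
      = s + pvLast mx l := by
  intro l
  induction l with
  | nil => intro s acc hm; cases hm
  | cons h r ih =>
    intro s acc hm
    rw [PySem.List.enumerate_cons]
    simp only [List.foldl_cons]
    by_cases hmr : mx ∈ r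
    · rw [ih (s + 1) _ hmr]
      simp only [pvLast, if_pos hmr]
      ring
    · have hh : h = mx := by
        cases List.mem_cons.mp hm with
        | inl h' => exact h'.symm
        | inr h' => exact absurd h' hmr
      rw [if_pos hh]
      rw [pvB2_none mx r (s + 1) s hmr]
      simp only [pvLast, if_neg hmr]
      ring

-- ===== VERDICT (by name: the statement is the Claim_ definition above) =====
theorem stone_game4_spec : Claim_equal_stone_game4 := by
  unfold Claim_equal_stone_game4
  intro n lst _ hpre
  unfold Spec_stone_game4 stone_game4 stone_game4_alt
  obtain ⟨mn, hmn⟩ : ∃ mn, PySem.List.min? lst (fun x => x) = some mn := by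
    cases h : PySem.List.min? lst (fun x => x) with
    | none => exact absurd ((PySem.List.min?_eq_none_iff lst fun x => x).mp h) hpre
    | some m => exact ⟨m, rfl⟩
  obtain ⟨mx, hmx⟩ : ∃ mx, PySem.List.max? lst (fun x => x) = some mx := by
    cases h : PySem.List.max? lst (fun x => x) with
    | none => exact absurd ((PySem.List.max?_eq_none_iff lst fun x => x).mp h) hpre
    | some m => exact ⟨m, rfl⟩
  rw [hmn, hmx]
  have hmem : mn ∈ lst := PySem.List.min?_mem hmn
  have hbudget : (if 0 < n then n else 0) = ((n.toNat : Nat) : Int) := by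
    split_ifs <;> omega
  dsimp only
  rw [hbudget, ← pv_phase1_eq mn n.toNat lst 0 hmem]
  cases hA : pvA_phase1 mn n.toNat lst 0 with
  | mk l1 t1 =>
    by_cases hmx1 : mx ∈ l1
    · simp only [if_pos hmx1]
      rw [pvA2_eq mx l1 l1.length t1 hmx1 le_rfl]
      rw [pvB2_eq mx l1 0 0 hmx1]
      ring
    · simp only [if_neg hmx1]
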